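-- pv_equiv track=rewrite | github.com/Whyborn/CodingChallenges | FoobarGoogle/queue-to-do.py | solution
-- ===== SOURCE A (Python) =====
-- def solution(start, length):
--
--     checksum = 0
--     num_queues = 0
--     while num_queues < length:
--         start_ID = start + length * num_queues
--         end_ID = start_ID + (length - num_queues -1)
--         checksum ^= XOR(start_ID, end_ID)
--         num_queues += 1
--
--     return checksum
--
-- def XOR(n, m):
--     val = n % 4
--     outcomes = [m, 1, m+1, 0]
--     if val in [0, 2]:
--         return outcomes[(m - n) % 4]
--     elif val in [1, 3]:
--         return n ^ outcomes[(m - (n + 1)) % 4]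
--     else:
--         return -1
-- ===== SOURCE B (Python) =====
-- def solution(start, length):
--     checksum = 0
--     for q in range(length):
--         lo = start + length * q
--         hi = lo + (length - q - 1)
--         # XOR head elements until lo is a multiple of 4
--         while lo % 4 != 0 and lo <= hi:
--             checksum ^= lo
--             lo += 1
--         # XOR tail elements until the block [lo, hi] ends just before a multiple of 4
--         while hi % 4 != 3 and lo <= hi:
--             checksum ^= hi
--             hi -= 1
--         # what remains is whole aligned blocks {4k, 4k+1, 4k+2, 4k+3}, each XORing to 0
--     return checksum
-- ===== Notes on version B (the rewrite author's own statement) =====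
-- stated objective: alternative
-- what changed: A's mod-4 lookup-table closed-form range-XOR helper is removed: per queue B XORs only the few boundary IDs before/after multiple-of-4 alignment and skips the rest, because every aligned block of four consecutive integers XORs to 0.
import Mathlib
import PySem

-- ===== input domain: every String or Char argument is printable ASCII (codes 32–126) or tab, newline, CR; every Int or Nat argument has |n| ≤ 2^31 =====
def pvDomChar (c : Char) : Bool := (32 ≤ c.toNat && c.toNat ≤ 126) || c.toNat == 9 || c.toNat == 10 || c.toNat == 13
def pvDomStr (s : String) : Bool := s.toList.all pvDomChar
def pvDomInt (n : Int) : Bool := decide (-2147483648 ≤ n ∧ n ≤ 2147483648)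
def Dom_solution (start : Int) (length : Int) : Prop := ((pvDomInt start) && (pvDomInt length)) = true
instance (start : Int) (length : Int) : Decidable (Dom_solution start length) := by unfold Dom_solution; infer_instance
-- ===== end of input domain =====

-- B drops A's mod-4 lookup-table closed-form range-XOR helper: per queue it XORs only the
-- few boundary IDs up to/after multiple-of-4 alignment, since every aligned block of four
-- consecutive integers XORs to 0 (alternative mechanism, same O(length) cost).


-- ===== PORT A =====
-- helper XOR(n, m): the list indexings outcomes[…] use pyGetD with an unreachable
-- default (the index is a mod-4 value, always 0..3, so Python never raises here).
def pyXOR (n m : Int) : Int :=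
  let val := PySem.Int.mod n 4
  let outcomes : List Int := [m, 1, m + 1, 0]
  if val = 0 ∨ val = 2 then
    PySem.List.pyGetD outcomes (PySem.Int.mod (m - n) 4) (-1)
  else if val = 1 ∨ val = 3 then
    PySem.Int.bxor n (PySem.List.pyGetD outcomes (PySem.Int.mod (m - (n + 1)) 4) (-1))
  else -1

-- the while-loop of A, state (num_queues, checksum)
def solutionLoop (start length numQueues checksum : Int) : Int :=
  if _h : numQueues < length then
    let startID := start + length * numQueues
    let endID := startID + (length - numQueues - 1)
    solutionLoop start length (numQueues + 1) (PySem.Int.bxor checksum (pyXOR startID endID))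
  else checksum
termination_by (length - numQueues).toNat
decreasing_by omega

def solution (start : Int) (length : Int) : Int :=
  solutionLoop start length 0 0

-- ===== PORT B =====
-- Source B's first while loop: XOR head elements until lo is a multiple of 4
def headLoopB (lo hi c : Int) : Int × Int :=
  if _h : PySem.Int.mod lo 4 ≠ 0 ∧ lo ≤ hi then
    headLoopB (lo + 1) hi (PySem.Int.bxor c lo)
  else (lo, c)
termination_by (hi + 1 - lo).toNat
decreasing_by omega

-- Source B's second while loop: XOR tail elements until hi is 3 mod 4
def tailLoopB (lo hi c : Int) : Int × Int :=
  if _h : PySem.Int.mod hi 4 ≠ 3 ∧ lo ≤ hi then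
    tailLoopB lo (hi - 1) (PySem.Int.bxor c hi)
  else (hi, c)
termination_by (hi + 1 - lo).toNat
decreasing_by omega

-- one iteration of Source B's outer for-loop (the remaining aligned blocks are skipped)
def rowB (lo hi c : Int) : Int :=
  let p := headLoopB lo hi c
  (tailLoopB p.1 hi p.2).2

def solution_alt (start : Int) (length : Int) : Int :=
  (PySem.List.pyRange 0 length 1).foldl
    (fun checksum q =>
      rowB (start + length * q) (start + length * q + (length - q - 1)) checksum) 0

-- ===== PRECONDITION & SPEC =====
def Spec_solution (start : Int) (length : Int) (out : Int) : Prop := out = solution_alt start length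
instance (start : Int) (length : Int) (out : Int) : Decidable (Spec_solution start length out) := by unfold Spec_solution; infer_instance

-- ===== CLAIM (what is proved, stated in full; the proofs are below) =====
def Claim_equal_solution : Prop := ∀ (start : Int) (length : Int), Dom_solution start length → Spec_solution start length (solution start length)

-- ===== LEMMAS AND PROOFS =====

theorem bxor_nsn (m n : Nat) : PySem.Int.bxor (Int.negSucc m) (n : Int) = Int.negSucc (m ^^^ n) := by
  simp [PySem.Int.bxor, Int.negSucc_eq]
  rw [if_neg (by omega : ¬((m : Int) ≤ -1))]; omega

theorem bxor_nns (m n : Nat) : PySem.Int.bxor (m : Int) (Int.negSucc n) = Int.negSucc (m ^^^ n) := by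
  simp [PySem.Int.bxor, Int.negSucc_eq]
  rw [if_neg (by omega : ¬((n : Int) ≤ -1))]; omega

theorem bxor_nsns (m n : Nat) : PySem.Int.bxor (Int.negSucc m) (Int.negSucc n) = ((m ^^^ n : Nat) : Int) := by
  simp [PySem.Int.bxor, Int.negSucc_eq]
  omega

theorem bxor_assoc (a b c : Int) :
    PySem.Int.bxor (PySem.Int.bxor a b) c = PySem.Int.bxor a (PySem.Int.bxor b c) := by
  rcases a with a | a <;> rcases b with b | b <;> rcases c with c | c <;>
    simp [Int.ofNat_eq_natCast, bxor_nsn, bxor_nns, bxor_nsns, Nat.xor_assoc]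

theorem bxor_zero_left (a : Int) : PySem.Int.bxor 0 a = a := by
  rw [PySem.Int.bxor_comm, PySem.Int.bxor_zero]

theorem nat_even_xor_one (n : Nat) (h : n % 2 = 0) : n ^^^ 1 = n + 1 := by
  apply Nat.eq_of_testBit_eq
  intro i
  cases i with
  | zero => simp only [Nat.testBit_zero, Nat.xor_mod_two_eq]
  | succ j =>
    simp only [Nat.testBit_succ]
    have h1 : (n ^^^ 1) / 2 = n / 2 := by
      have := @Nat.shiftRight_xor_distrib 1 n 1
      simpa [Nat.shiftRight_succ, Nat.shiftRight_zero] using this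
    have h2 : (n + 1) / 2 = n / 2 := by omega
    rw [h1, h2]

theorem nat_odd_xor_one (n : Nat) (h : n % 2 = 1) : n ^^^ 1 = n - 1 := by
  have he : (n - 1) ^^^ 1 = n := by rw [nat_even_xor_one (n - 1) (by omega)]; omega
  calc n ^^^ 1 = ((n - 1) ^^^ 1) ^^^ 1 := by rw [he]
    _ = (n - 1) ^^^ (1 ^^^ 1) := Nat.xor_assoc _ _ _
    _ = n - 1 := by simp

theorem bxor_even_one (m : Int) (h : m % 2 = 0) : PySem.Int.bxor m 1 = m + 1 := by
  rcases m with n | n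
  · simp only [Int.ofNat_eq_natCast] at h ⊢
    have : ((1 : Nat) : Int) = (1 : Int) := by norm_num
    rw [← this, PySem.Int.bxor_natCast, nat_even_xor_one n (by omega)]
    push_cast; ring
  · have hn : n % 2 = 1 := by omega
    have : ((1 : Nat) : Int) = (1 : Int) := by norm_num
    rw [← this, bxor_nsn, nat_odd_xor_one n hn, Int.negSucc_eq, Int.negSucc_eq]
    omega

theorem bxor_odd_one (m : Int) (h : m % 2 = 1) : PySem.Int.bxor m 1 = m - 1 := by
  have he : PySem.Int.bxor (m - 1) 1 = m := by rw [bxor_even_one (m - 1) (by omega)]; ring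
  calc PySem.Int.bxor m 1 = PySem.Int.bxor (PySem.Int.bxor (m - 1) 1) 1 := by rw [he]
    _ = PySem.Int.bxor (m - 1) (PySem.Int.bxor 1 1) := bxor_assoc _ _ _
    _ = m - 1 := by rw [PySem.Int.bxor_self, PySem.Int.bxor_zero]

-- n even → n ^ (n+1) = 1
theorem bxor_succ_even (n : Int) (h : n % 2 = 0) : PySem.Int.bxor n (n + 1) = 1 := by
  calc PySem.Int.bxor n (n + 1) = PySem.Int.bxor n (PySem.Int.bxor n 1) := by
        rw [bxor_even_one n h]
    _ = PySem.Int.bxor (PySem.Int.bxor n n) 1 := (bxor_assoc _ _ _).symm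
    _ = 1 := by rw [PySem.Int.bxor_self, bxor_zero_left]

-- A's helper on the degenerate range [n, n] is n
theorem pyXOR_self (n : Int) : pyXOR n n = n := by
  unfold pyXOR
  have h4 : (0:Int) < 4 := by norm_num
  simp only [PySem.Int.mod_eq_emod_of_pos h4]
  have hn : n % 4 = 0 ∨ n % 4 = 1 ∨ n % 4 = 2 ∨ n % 4 = 3 := by omega
  rcases hn with hn | hn | hn | hn <;> rw [hn] <;> norm_num <;>
    simp [PySem.List.pyGetD, PySem.List.pyGet?, PySem.List.pyIdx?, PySem.Int.bxor_zero]

-- the four xor identities the even-n cases of pyXOR_step reduce to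
theorem ev0 (n m : Int) (hn : n % 2 = 0) (hm : m % 2 = 0) :
    PySem.Int.bxor n (PySem.Int.bxor (n + 1) (m + 1)) = m := by
  rw [← bxor_assoc, bxor_succ_even n hn, PySem.Int.bxor_comm 1 (m + 1),
    bxor_odd_one (m + 1) (by omega)]
  ring

theorem ev1 (n : Int) (hn : n % 2 = 0) :
    PySem.Int.bxor n (PySem.Int.bxor (n + 1) 0) = 1 := by
  rw [PySem.Int.bxor_zero, bxor_succ_even n hn]

theorem ev2 (n m : Int) (hn : n % 2 = 0) (hm : m % 2 = 0) :
    PySem.Int.bxor n (PySem.Int.bxor (n + 1) m) = m + 1 := by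
  rw [← bxor_assoc, bxor_succ_even n hn, PySem.Int.bxor_comm 1 m, bxor_even_one m hm]

theorem ev3 (n : Int) (hn : n % 2 = 0) :
    PySem.Int.bxor n (PySem.Int.bxor (n + 1) 1) = 0 := by
  rw [bxor_odd_one (n + 1) (by omega), (by ring : n + 1 - 1 = n), PySem.Int.bxor_self]

-- the recurrence B's inner loop realises: XOR of [n, m] = n ^ XOR of [n+1, m]
theorem pyXOR_step (n m : Int) (_h : n < m) :
    pyXOR n m = PySem.Int.bxor n (pyXOR (n + 1) m) := by
  unfold pyXOR
  have h4 : (0:Int) < 4 := by norm_num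
  simp only [PySem.Int.mod_eq_emod_of_pos h4]
  have hn : n % 4 = 0 ∨ n % 4 = 1 ∨ n % 4 = 2 ∨ n % 4 = 3 := by omega
  have hd : (m - n) % 4 = 0 ∨ (m - n) % 4 = 1 ∨ (m - n) % 4 = 2 ∨ (m - n) % 4 = 3 := by
    omega
  rcases hn with hn | hn | hn | hn
  · rw [hn, (by omega : (n + 1) % 4 = (1:Int)),
      (by omega : (m - (n + 1 + 1)) % 4 = ((m - n) % 4 + 2) % 4)]
    norm_num
    rcases hd with hd | hd | hd | hd
    · rw [hd, (by omega : (m - n + 2) % 4 = (2:Int))]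
      simp only [PySem.List.pyGetD, PySem.List.pyGet?, PySem.List.pyIdx?]
      norm_num
      exact (ev0 n m (by omega) (by omega)).symm
    · rw [hd, (by omega : (m - n + 2) % 4 = (3:Int))]
      simp only [PySem.List.pyGetD, PySem.List.pyGet?, PySem.List.pyIdx?]
      norm_num
      exact (ev1 n (by omega)).symm
    · rw [hd, (by omega : (m - n + 2) % 4 = (0:Int))]
      simp only [PySem.List.pyGetD, PySem.List.pyGet?, PySem.List.pyIdx?]
      norm_num
      exact (ev2 n m (by omega) (by omega)).symm
    · rw [hd, (by omega : (m - n + 2) % 4 = (1:Int))]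
      simp only [PySem.List.pyGetD, PySem.List.pyGet?, PySem.List.pyIdx?]
      norm_num
      exact (ev3 n (by omega)).symm
  · rw [hn, (by omega : (n + 1) % 4 = (2:Int))]
    norm_num
  · rw [hn, (by omega : (n + 1) % 4 = (3:Int)),
      (by omega : (m - (n + 1 + 1)) % 4 = ((m - n) % 4 + 2) % 4)]
    norm_num
    rcases hd with hd | hd | hd | hd
    · rw [hd, (by omega : (m - n + 2) % 4 = (2:Int))]
      simp only [PySem.List.pyGetD, PySem.List.pyGet?, PySem.List.pyIdx?]
      norm_num
      exact (ev0 n m (by omega) (by omega)).symm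
    · rw [hd, (by omega : (m - n + 2) % 4 = (3:Int))]
      simp only [PySem.List.pyGetD, PySem.List.pyGet?, PySem.List.pyIdx?]
      norm_num
      exact (ev1 n (by omega)).symm
    · rw [hd, (by omega : (m - n + 2) % 4 = (0:Int))]
      simp only [PySem.List.pyGetD, PySem.List.pyGet?, PySem.List.pyIdx?]
      norm_num
      exact (ev2 n m (by omega) (by omega)).symm
    · rw [hd, (by omega : (m - n + 2) % 4 = (1:Int))]
      simp only [PySem.List.pyGetD, PySem.List.pyGet?, PySem.List.pyIdx?]
      norm_num
      exact (ev3 n (by omega)).symm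
  · rw [hn, (by omega : (n + 1) % 4 = (0:Int))]
    norm_num

-- B's inner loop over pyRange n (m+1) 1 computes bxor c (pyXOR n m)
theorem inner_fold (k : Nat) : ∀ (n m c : Int), (m - n).toNat = k → n ≤ m →
    (PySem.List.pyRange n (m + 1) 1).foldl (fun c i => PySem.Int.bxor c i) c
      = PySem.Int.bxor c (pyXOR n m) := by
  induction k with
  | zero =>
    intro n m c hk hle
    have hnm : n = m := by omega
    subst hnm
    rw [PySem.List.pyRange_one_cons (by omega), List.foldl_cons,
      PySem.List.pyRange_one_eq_nil (by omega), List.foldl_nil, pyXOR_self]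
  | succ j ih =>
    intro n m c hk hle
    have hlt : n < m := by omega
    rw [PySem.List.pyRange_one_cons (by omega), List.foldl_cons,
      ih (n + 1) m _ (by omega) (by omega), bxor_assoc, ← pyXOR_step n m hlt]

-- accumulator commutes out of a bxor-fold
theorem foldl_bxor_acc (l : List Int) (c d : Int) :
    l.foldl (fun x i => PySem.Int.bxor x i) (PySem.Int.bxor c d)
      = PySem.Int.bxor (l.foldl (fun x i => PySem.Int.bxor x i) c) d := by
  induction l generalizing c with
  | nil => rfl
  | cons a l ih =>
    simp only [List.foldl_cons]
    rw [bxor_assoc, PySem.Int.bxor_comm d a, ← bxor_assoc, ih]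

-- an aligned run of whole blocks {4k, 4k+1, 4k+2, 4k+3} XORs to nothing
theorem block_zero (k : Nat) : ∀ (lo hi c : Int), (hi + 1 - lo).toNat = k →
    lo % 4 = 0 → hi % 4 = 3 →
    (PySem.List.pyRange lo (hi + 1) 1).foldl (fun x i => PySem.Int.bxor x i) c = c := by
  induction k using Nat.strong_induction_on with
  | _ k ih =>
    intro lo hi c hk hlo hhi
    by_cases hle : lo ≤ hi
    · have h3 : lo + 3 ≤ hi := by omega
      rw [PySem.List.pyRange_one_cons (by omega), List.foldl_cons,
        PySem.List.pyRange_one_cons (by omega), List.foldl_cons,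
        PySem.List.pyRange_one_cons (by omega), List.foldl_cons,
        PySem.List.pyRange_one_cons (by omega), List.foldl_cons]
      have hc : PySem.Int.bxor (PySem.Int.bxor (PySem.Int.bxor (PySem.Int.bxor c lo)
          (lo + 1)) (lo + 2)) (lo + 3) = c := by
        rw [bxor_assoc c lo _, bxor_succ_even lo (by omega),
          bxor_assoc c 1 _, PySem.Int.bxor_comm 1 (lo + 2),
          bxor_even_one (lo + 2) (by omega), (by ring : lo + 2 + 1 = lo + 3),
          bxor_assoc, PySem.Int.bxor_self, PySem.Int.bxor_zero]
      simp only [show lo + 1 + 1 = lo + 2 from by ring, show lo + 2 + 1 = lo + 3 from by ring,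
        show lo + 3 + 1 = lo + 4 from by ring]
      rw [hc]
      exact ih (k - 4) (by omega) (lo + 4) hi c (by omega) (by omega) hhi
    · rw [PySem.List.pyRange_one_eq_nil (by omega), List.foldl_nil]

-- the head loop preserves the fold over what is left and aligns lo (or empties the range)
theorem headLoop_spec (k : Nat) : ∀ (lo hi c : Int), (hi + 1 - lo).toNat = k →
    (PySem.List.pyRange (headLoopB lo hi c).1 (hi + 1) 1).foldl
        (fun x i => PySem.Int.bxor x i) (headLoopB lo hi c).2
      = (PySem.List.pyRange lo (hi + 1) 1).foldl (fun x i => PySem.Int.bxor x i) c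
    ∧ ((headLoopB lo hi c).1 % 4 = 0 ∨ hi < (headLoopB lo hi c).1) := by
  induction k using Nat.strong_induction_on with
  | _ k ih =>
    intro lo hi c hk
    rw [headLoopB]
    have h4 : (0:Int) < 4 := by norm_num
    simp only [PySem.Int.mod_eq_emod_of_pos h4]
    by_cases hcond : lo % 4 ≠ 0 ∧ lo ≤ hi
    · rw [dif_pos hcond]
      have := ih (k - 1) (by omega) (lo + 1) hi (PySem.Int.bxor c lo) (by omega)
      refine ⟨?_, this.2⟩
      rw [this.1, PySem.List.pyRange_one_cons (by omega : lo < hi + 1), List.foldl_cons]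
    · rw [dif_neg hcond]
      exact ⟨rfl, by omega⟩

-- the tail loop computes the remaining fold once lo is aligned (or the range is empty)
theorem tailLoop_spec (k : Nat) : ∀ (lo hi c : Int), (hi + 1 - lo).toNat = k →
    (lo % 4 = 0 ∨ hi < lo) →
    (tailLoopB lo hi c).2
      = (PySem.List.pyRange lo (hi + 1) 1).foldl (fun x i => PySem.Int.bxor x i) c := by
  induction k using Nat.strong_induction_on with
  | _ k ih =>
    intro lo hi c hk hlo
    rw [tailLoopB]
    have h4 : (0:Int) < 4 := by norm_num
    simp only [PySem.Int.mod_eq_emod_of_pos h4]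
    by_cases hcond : hi % 4 ≠ 3 ∧ lo ≤ hi
    · rw [dif_pos hcond]
      rw [ih (k - 1) (by omega) lo (hi - 1) (PySem.Int.bxor c hi) (by omega) (by omega)]
      rw [foldl_bxor_acc, (by ring : hi - 1 + 1 = hi),
        PySem.List.pyRange_one_succ_right (by omega : lo ≤ hi), List.foldl_append]
      rfl
    · rw [dif_neg hcond]
      rcases hlo with hlo | hlo
      · by_cases hle : lo ≤ hi
        · exact (block_zero _ lo hi c rfl hlo (by omega)).symm
        · rw [PySem.List.pyRange_one_eq_nil (by omega), List.foldl_nil]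
      · rw [PySem.List.pyRange_one_eq_nil (by omega), List.foldl_nil]

-- one row of B equals the element-by-element XOR of [lo, hi], hence A's closed form
theorem rowB_eq (lo hi c : Int) (h : lo ≤ hi) :
    rowB lo hi c = PySem.Int.bxor c (pyXOR lo hi) := by
  unfold rowB
  have hh := headLoop_spec (hi + 1 - lo).toNat lo hi c rfl
  rw [tailLoop_spec (hi + 1 - (headLoopB lo hi c).1).toNat _ hi _ rfl hh.2, hh.1]
  exact inner_fold (hi - lo).toNat lo hi c rfl h

-- A's per-row contribution, named for the outer-loop lemma
def outerA (start length : Int) (checksum q : Int) : Int :=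
  PySem.Int.bxor checksum
    (pyXOR (start + length * q) (start + length * q + (length - q - 1)))

theorem loop_eq_fold (k : Nat) : ∀ (start length nq c : Int), (length - nq).toNat = k →
    solutionLoop start length nq c
      = (PySem.List.pyRange nq length 1).foldl (outerA start length) c := by
  induction k with
  | zero =>
    intro start length nq c hk
    rw [solutionLoop, dif_neg (by omega), PySem.List.pyRange_one_eq_nil (by omega), List.foldl_nil]
  | succ j ih =>
    intro start length nq c hk
    have hlt : nq < length := by omega
    rw [solutionLoop, dif_pos hlt, PySem.List.pyRange_one_cons hlt, List.foldl_cons]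
    rw [ih start length (nq + 1) _ (by omega)]
    rfl

theorem alt_eq_foldA (start length : Int) :
    solution_alt start length = (PySem.List.pyRange 0 length 1).foldl (outerA start length) 0 := by
  unfold solution_alt
  apply PySem.List.foldl_congr_mem
  intro acc q hq
  have hq' := (PySem.List.mem_pyRange_one).1 hq
  exact rowB_eq _ _ acc (by omega)

-- ===== VERDICT (by name: the statement is the Claim_ definition above) =====
theorem solution_spec : Claim_equal_solution := by
  intro start length _
  unfold Spec_solution solution
  rw [alt_eq_foldA]
  exact loop_eq_fold (length - 0).toNat start length 0 0 rfl
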